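-- pv_equiv track=rewrite | github.com/abeeto/PyTorchCodeCloneAnalysis | GHData/joe-bender_NearbyWordsPredictorTorch/helpers.py | get_training_pairs
-- ===== SOURCE A (Python) =====
-- def get_training_pairs(words, window_size=5):
--     pairs = []
--     for i in range(0, len(words)):
--         left = max(0, i-window_size)
--         right = min(len(words)-1, i+window_size)
--         left_range = words[left:i]
--         right_range = words[i+1:right+1]
--         targets = left_range + right_range
--         input = words[i]
--         for target in targets:
--             pairs.append((input, target))
--     return pairs
-- ===== SOURCE B (Python) =====
-- def get_training_pairs(words, window_size=5):
--     # Streaming single pass: slide a bounded left-context buffer and a bounded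
--     # right-lookahead buffer along the word stream instead of cutting a fresh
--     # slice window around every index.
--     if window_size <= 0:
--         return []
--     pairs = []
--     left = []                               # up to window_size words before the center
--     right = words[1:window_size + 1]        # the window_size words after the center
--     ahead = iter(words[window_size + 1:])   # feed for the right buffer
--     for center in words:
--         for t in left:
--             pairs.append((center, t))
--         for t in right:
--             pairs.append((center, t))
--         left.append(center)
--         if len(left) > window_size:
--             del left[0]
--         if right:
--             del right[0]
--         nxt = next(ahead, None)
--         if nxt is not None:
--             right.append(nxt)
--     return pairs
-- ===== Notes on version B (the rewrite author's own statement) =====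
-- stated objective: alternative
-- what changed: Replaces A's per-center recomputation of the window (clamped index arithmetic plus two fresh slices and a concatenation for every i) by a single streaming pass that never indexes into the list: a bounded left-context buffer and a bounded right-lookahead buffer are slid along the word stream, updated incrementally (append/delete one element) at each step, with the lookahead fed from an iterator.
-- intended difference: For window_size <= -2 with more than -window_size words, A's negative slice stop (right+1 < 0) wraps around to the end of the list and A returns accidental pairs of far-apart words (e.g. A(['a','b','c'],-2)=[('a','b')]); B returns [], the intended value for an empty window. — e.g. on get_training_pairs(["a", "b", "c"], -2): A returns [("a", "b")], B returns []
import Mathlib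
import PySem

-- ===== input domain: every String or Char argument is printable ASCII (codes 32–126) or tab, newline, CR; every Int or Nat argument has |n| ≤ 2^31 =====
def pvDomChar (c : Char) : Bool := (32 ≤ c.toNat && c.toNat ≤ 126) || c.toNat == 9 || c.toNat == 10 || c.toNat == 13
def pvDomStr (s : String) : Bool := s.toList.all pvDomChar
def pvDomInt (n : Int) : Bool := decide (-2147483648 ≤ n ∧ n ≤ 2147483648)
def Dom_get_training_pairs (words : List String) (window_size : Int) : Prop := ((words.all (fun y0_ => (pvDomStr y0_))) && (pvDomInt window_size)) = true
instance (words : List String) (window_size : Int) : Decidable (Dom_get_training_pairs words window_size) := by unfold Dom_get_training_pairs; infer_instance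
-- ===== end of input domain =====

-- B replaces A's per-center window recomputation (clamped bounds, two fresh slices and a
-- concatenation for every index) by one streaming pass sliding a bounded left-context
-- buffer and a bounded right-lookahead buffer along the word stream (alternative
-- decomposition, same cost); equivalence is about the return value; A and B differ only
-- on the D_ region stated below.

-- ===== PORT A =====
-- words[i] with i from range(0, len(words)) is always in range, so pyGetD with a
-- default is exact here.
def get_training_pairs (words : List String) (window_size : Int) : List (String × String) :=
  (PySem.List.pyRange 0 (words.length : Int) 1).foldl (fun pairs i =>
    let left := max 0 (i - window_size)
    let right := min ((words.length : Int) - 1) (i + window_size)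
    let left_range := PySem.List.slice words (some left) (some i)
    let right_range := PySem.List.slice words (some (i + 1)) (some (right + 1))
    let targets := left_range ++ right_range
    let input := PySem.List.pyGetD words i ""
    targets.foldl (fun acc t => acc ++ [(input, t)]) pairs) []

-- ===== PORT B =====
-- The 'for center in words' loop with mutable state (pairs, left, right, ahead);
-- 'next(ahead, None)' + the None check is the match on the ahead list.
def pvGoB (ws : Int) (cs : List String) (pairs : List (String × String))
    (left right ahead : List String) : List (String × String) :=
  match cs with
  | [] => pairs
  | center :: rest =>
      let pairs1 := left.foldl (fun acc t => acc ++ [(center, t)]) pairs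
      let pairs2 := right.foldl (fun acc t => acc ++ [(center, t)]) pairs1
      let left1 := left ++ [center]
      let left2 := if (left1.length : Int) > ws then left1.drop 1 else left1
      let right1 := if right.isEmpty then right else right.drop 1
      match ahead with
      | [] => pvGoB ws rest pairs2 left2 right1 []
      | a :: ahead' => pvGoB ws rest pairs2 left2 (right1 ++ [a]) ahead'

def get_training_pairs_alt (words : List String) (window_size : Int) : List (String × String) :=
  if window_size ≤ 0 then []
  else
    pvGoB window_size words [] []
      (PySem.List.slice words (some 1) (some (window_size + 1)))
      (PySem.List.slice words (some (window_size + 1)) none)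

-- ===== PRECONDITION & SPEC =====
-- For window_size ≤ -2 with more than -window_size words, A's negative slice stop
-- (right+1 < 0) wraps around to the end of the list and A returns accidental pairs of
-- far-apart words; B returns [] (an empty window yields no pairs), the intended value.
def D_get_training_pairs (words : List String) (window_size : Int) : Prop :=
  window_size ≤ -2 ∧ (words.length : Int) > -window_size
instance (words : List String) (window_size : Int) : Decidable (D_get_training_pairs words window_size) := by
  unfold D_get_training_pairs; infer_instance

def Spec_get_training_pairs (words : List String) (window_size : Int) (out : List (String × String)) : Prop :=
  ¬ D_get_training_pairs words window_size → out = get_training_pairs_alt words window_size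
instance (words : List String) (window_size : Int) (out : List (String × String)) : Decidable (Spec_get_training_pairs words window_size out) := by
  unfold Spec_get_training_pairs; infer_instance

def pvDiffWitness_get_training_pairs : List String × Int := (["a", "b", "c"], -2)
def pvDiffWitnessOut_get_training_pairs : (List (String × String)) × (List (String × String)) :=
  ([("a", "b")], [])

-- ===== CLAIM (what is proved, stated in full; the proofs are below) =====
def Claim_unchanged_get_training_pairs : Prop := ∀ (words : List String) (window_size : Int), Dom_get_training_pairs words window_size → Spec_get_training_pairs words window_size (get_training_pairs words window_size)
def Claim_changed_get_training_pairs : Prop := Dom_get_training_pairs (pvDiffWitness_get_training_pairs.1) (pvDiffWitness_get_training_pairs.2) ∧ D_get_training_pairs (pvDiffWitness_get_training_pairs.1) (pvDiffWitness_get_training_pairs.2) ∧ get_training_pairs (pvDiffWitness_get_training_pairs.1) (pvDiffWitness_get_training_pairs.2) = pvDiffWitnessOut_get_training_pairs.1 ∧ get_training_pairs_alt (pvDiffWitness_get_training_pairs.1) (pvDiffWitness_get_training_pairs.2) = pvDiffWitnessOut_get_training_pairs.2 ∧ pvDiffWitnessOut_get_training_pairs.1 ≠ pvDiffWitnessOu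t_get_training_pairs.2
def Claim_exact_get_training_pairs : Prop := ∀ (words : List String) (window_size : Int), Dom_get_training_pairs words window_size → D_get_training_pairs words window_size → get_training_pairs words window_size ≠ get_training_pairs_alt words window_size

-- ===== LEMMAS AND PROOFS =====

-- A's per-center chunk (proof-only abbreviation for what A appends at center i)
def pvChunk (words : List String) (ws i : Int) : List (String × String) :=
  (PySem.List.slice words (some (max 0 (i - ws))) (some i)
    ++ PySem.List.slice words (some (i + 1)) (some (min ((words.length : Int) - 1) (i + ws) + 1))).map
    (fun t => (PySem.List.pyGetD words i "", t))

-- A rewritten as a flatMap of per-center chunks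
theorem get_training_pairs_eq_flatMap (words : List String) (ws : Int) :
    get_training_pairs words ws
      = (PySem.List.pyRange 0 (words.length : Int) 1).flatMap (pvChunk words ws) := by
  unfold get_training_pairs pvChunk
  simp only [PySem.List.foldl_append_singleton_eq_map, PySem.List.foldl_append_eq_flatMap,
    List.nil_append]

-- B's sliding buffers at center index i
def pvL (words : List String) (w i : Nat) : List String := (words.drop (i - w)).take (min i w)
def pvR (words : List String) (w i : Nat) : List String := (words.drop (i + 1)).take w
def pvAH (words : List String) (w i : Nat) : List String := words.drop (i + 1 + w)

theorem pvL_length (words : List String) (w i : Nat) (hi : i ≤ words.length) :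
    (pvL words w i).length = min i w := by
  simp [pvL]; omega

-- the emitted chunk: buffers at i, mapped, are A's chunk at i
theorem pv_emit_eq (words : List String) (ws : Int) (i : Nat) (hw : 1 ≤ ws)
    (hi : i < words.length) :
    (pvL words ws.toNat i ++ pvR words ws.toNat i).map (fun t => (words[i], t))
      = pvChunk words ws (i : Int) := by
  unfold pvChunk
  have hcenter : PySem.List.pyGetD words (i : Int) "" = words[i] := by
    rw [PySem.List.pyGetD_eq_getElem words "" (by omega) (by exact_mod_cast hi)]
    simp
  have hL : PySem.List.slice words (some (max 0 ((i : Int) - ws))) (some (i : Int))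
      = pvL words ws.toNat i := by
    rw [PySem.List.slice_toNat words (a := max 0 ((i : Int) - ws)) (b := (i : Int))
        (by omega) (by omega)]
    unfold pvL
    rw [show (max 0 ((i : Int) - ws)).toNat = i - ws.toNat from by omega]
    congr 1
    omega
  have hR : PySem.List.slice words (some ((i : Int) + 1))
        (some (min ((words.length : Int) - 1) ((i : Int) + ws) + 1))
      = pvR words ws.toNat i := by
    rcases le_or_gt ((words.length : Int) - 1) ((i : Int) + ws) with h | h
    · rw [min_eq_left h]
      rw [PySem.List.slice_toNat words (a := (i : Int) + 1)
          (b := (words.length : Int) - 1 + 1) (by omega) (by omega)]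
      rw [show ((i : Int) + 1).toNat = i + 1 from by omega,
          show ((words.length : Int) - 1 + 1).toNat = words.length from by omega]
      unfold pvR
      have hd1 : (words.drop (i + 1)).length ≤ words.length - (i + 1) := by
        rw [List.length_drop]
      have hd2 : (words.drop (i + 1)).length ≤ ws.toNat := by
        rw [List.length_drop]; omega
      rw [List.take_of_length_le hd1, List.take_of_length_le hd2]
    · rw [min_eq_right (le_of_lt h)]
      rw [PySem.List.slice_toNat words (a := (i : Int) + 1)
          (b := (i : Int) + ws + 1) (by omega) (by omega)]
      rw [show ((i : Int) + 1).toNat = i + 1 from by omega]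
      unfold pvR
      congr 1
      omega
  rw [hcenter, hL, hR]

-- left-buffer transition
theorem pvL_step (words : List String) (ws : Int) (i : Nat) (hw : 1 ≤ ws)
    (hi : i < words.length) :
    (if ((pvL words ws.toNat i ++ [words[i]]).length : Int) > ws
      then (pvL words ws.toNat i ++ [words[i]]).drop 1
      else pvL words ws.toNat i ++ [words[i]])
      = pvL words ws.toNat (i + 1) := by
  have hlen := pvL_length words ws.toNat i (by omega)
  have hgrow : pvL words ws.toNat i ++ [words[i]]
      = (words.drop (i - ws.toNat)).take (min i ws.toNat + 1) := by
    unfold pvL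
    have hidx : min i ws.toNat < (words.drop (i - ws.toNat)).length := by
      rw [List.length_drop]; omega
    have hgi : words[i] = (words.drop (i - ws.toNat))[min i ws.toNat]'hidx := by
      simp only [List.getElem_drop]
      simp only [show i - ws.toNat + min i ws.toNat = i from by omega]
    rw [hgi, List.take_concat_get' _ _ hidx]
  rcases le_or_gt ws.toNat i with hcase | hcase
  · rw [if_pos (by simp only [List.length_append, List.length_singleton, hlen]; omega)]
    rw [hgrow, List.drop_take, List.drop_drop]
    unfold pvL
    rw [show i - ws.toNat + 1 = i + 1 - ws.toNat from by omega,
        show min i ws.toNat + 1 - 1 = min (i + 1) ws.toNat from by omega]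
  · rw [if_neg (by simp only [List.length_append, List.length_singleton, hlen]; omega)]
    rw [hgrow]
    unfold pvL
    rw [show min i ws.toNat + 1 = min (i + 1) ws.toNat from by omega,
        show i - ws.toNat = i + 1 - ws.toNat from by omega]

-- right-buffer deletion
theorem pvR_del (words : List String) (w i : Nat) :
    (pvR words w i).drop 1 = (words.drop (i + 1 + 1)).take (w - 1) := by
  unfold pvR
  rw [List.drop_take, List.drop_drop]

theorem pvAH_len (words : List String) (w i : Nat) :
    (pvAH words w i).length = words.length - (i + 1 + w) := by
  simp [pvAH]

-- ===== the main invariant: pvGoB from buffer state i computes A's remaining chunks =====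
theorem pvGoB_inv (words : List String) (ws : Int) (hw : 1 ≤ ws) :
    ∀ (k i : Nat) (pairs : List (String × String)), words.length - i = k → i ≤ words.length →
      pvGoB ws (words.drop i) pairs (pvL words ws.toNat i) (pvR words ws.toNat i) (pvAH words ws.toNat i)
        = pairs ++ (PySem.List.pyRange (i : Int) (words.length : Int) 1).flatMap (pvChunk words ws) := by
  intro k
  induction k with
  | zero =>
    intro i pairs hk hi
    have hie : i = words.length := by omega
    subst hie
    rw [List.drop_of_length_le (le_refl _), PySem.List.pyRange_one_eq_nil (by omega)]
    simp [pvGoB]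
  | succ k ih =>
    intro i pairs hk hi
    have hilt : i < words.length := by omega
    rw [List.drop_eq_getElem_cons hilt]
    unfold pvGoB
    simp only [PySem.List.foldl_append_singleton_eq_map]
    have hemit : pairs ++ List.map (fun t => (words[i], t)) (pvL words ws.toNat i)
          ++ List.map (fun t => (words[i], t)) (pvR words ws.toNat i)
        = pairs ++ pvChunk words ws (i : Int) := by
      rw [List.append_assoc, ← List.map_append, pv_emit_eq words ws i hw hilt]
    have hleft := pvL_step words ws i hw hilt
    have hrange : PySem.List.pyRange (i : Int) (words.length : Int) 1
        = (i : Int) :: PySem.List.pyRange ((i : Int) + 1) (words.length : Int) 1 :=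
      PySem.List.pyRange_one_cons (by exact_mod_cast hilt)
    have hcast : ((i : Int) + 1) = ((i + 1 : Nat) : Int) := by push_cast; ring
    cases hAH : pvAH words ws.toNat i with
    | nil =>
      dsimp only
      -- lookahead exhausted: i + 1 + w ≥ n
      have hahlen : words.length ≤ i + 1 + ws.toNat := by
        have := congrArg List.length hAH
        rw [pvAH_len] at this
        simp at this
        omega
      have hAH' : pvAH words ws.toNat (i + 1) = [] := by
        unfold pvAH
        rw [List.drop_eq_nil_iff]
        omega
      have hR' : (if (pvR words ws.toNat i).isEmpty then pvR words ws.toNat i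
            else (pvR words ws.toNat i).drop 1) = pvR words ws.toNat (i + 1) := by
        cases hre : (pvR words ws.toNat i).isEmpty with
        | false =>
          rw [if_neg (by simp)]
          rw [pvR_del]
          unfold pvR
          have hd1 : (words.drop (i + 1 + 1)).length ≤ ws.toNat - 1 := by
            rw [List.length_drop]; omega
          rw [List.take_of_length_le hd1, List.take_of_length_le (le_trans hd1 (by omega))]
        | true =>
          rw [if_pos rfl]
          unfold pvR at hre ⊢
          rw [List.isEmpty_iff, List.take_eq_nil_iff] at hre
          have h1 : words.drop (i + 1) = [] := by
            rcases hre with h0 | h0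
            · omega
            · exact h0
          have hlen1 : words.length ≤ i + 1 := List.drop_eq_nil_iff.mp h1
          have h2 : words.drop (i + 1 + 1) = [] := by
            rw [List.drop_eq_nil_iff]; omega
          rw [h1, h2]
      rw [hemit, hleft, hR']
      have hih := ih (i + 1) (pairs ++ pvChunk words ws (i : Int)) (by omega) (by omega)
      rw [hAH'] at hih
      rw [hih, hrange, List.flatMap_cons, hcast, List.append_assoc]
    | cons a ahead' =>
      dsimp only
      have hfeed : i + 1 + ws.toNat < words.length := by
        have := congrArg List.length hAH
        rw [pvAH_len] at this
        simp at this
        omega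
      have hahead : words.drop (i + 1 + ws.toNat)
          = words[i + 1 + ws.toNat] :: words.drop (i + 1 + ws.toNat + 1) :=
        List.drop_eq_getElem_cons hfeed
      have hAHu : pvAH words ws.toNat i = words.drop (i + 1 + ws.toNat) := rfl
      rw [hAHu, hahead] at hAH
      have ha : a = words[i + 1 + ws.toNat] := (List.cons_eq_cons.mp hAH).1.symm
      have hahead' : ahead' = pvAH words ws.toNat (i + 1) := by
        have h2 := (List.cons_eq_cons.mp hAH).2
        unfold pvAH
        rw [← h2]
        congr 1
        omega
      have hrnonempty : (pvR words ws.toNat i).isEmpty = false := by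
        rw [Bool.eq_false_iff, ne_eq]
        intro hemp
        unfold pvR at hemp
        rw [List.isEmpty_iff, List.take_eq_nil_iff] at hemp
        rcases hemp with h0 | h0
        · omega
        · rw [List.drop_eq_nil_iff] at h0
          omega
      have hR' : (if (pvR words ws.toNat i).isEmpty then pvR words ws.toNat i
            else (pvR words ws.toNat i).drop 1) ++ [a] = pvR words ws.toNat (i + 1) := by
        rw [if_neg (by simp [hrnonempty])]
        rw [pvR_del, ha]
        unfold pvR
        have hidx : ws.toNat - 1 < (words.drop (i + 1 + 1)).length := by
          rw [List.length_drop]; omega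
        have hgi : words[i + 1 + ws.toNat] = (words.drop (i + 1 + 1))[ws.toNat - 1]'hidx := by
          simp only [List.getElem_drop]
          simp only [show i + 1 + 1 + (ws.toNat - 1) = i + 1 + ws.toNat from by omega]
        rw [hgi, List.take_concat_get' _ _ hidx]
        rw [show ws.toNat - 1 + 1 = ws.toNat from by omega]
      rw [hemit, hleft, hR', hahead']
      have hih := ih (i + 1) (pairs ++ pvChunk words ws (i : Int)) (by omega) (by omega)
      rw [hih, hrange, List.flatMap_cons, hcast, List.append_assoc]

-- for window_size ≤ 0, B returns []
theorem alt_nil_of_nonpos (words : List String) (ws : Int) (hws : ws ≤ 0) :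
    get_training_pairs_alt words ws = [] := by
  unfold get_training_pairs_alt
  rw [if_pos hws]

-- a slice with both clamped bounds in the wrong order is empty
theorem slice_nil_of_le (xs : List String) (a b : Int)
    (h : PySem.List.clampIdx xs.length b ≤ PySem.List.clampIdx xs.length a) :
    PySem.List.slice xs (some a) (some b) = [] := by
  have hl := PySem.List.length_slice xs a b
  have : (PySem.List.slice xs (some a) (some b)).length = 0 := by omega
  exact List.eq_nil_of_length_eq_zero this

theorem clampIdx_nonneg_eq (n : Nat) (a : Int) (h : 0 ≤ a) :
    PySem.List.clampIdx n a = min a.toNat n := by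
  simp [PySem.List.clampIdx]
  omega

theorem clampIdx_neg_eq (n : Nat) (a : Int) (h : a < 0) :
    (PySem.List.clampIdx n a : Int) = max 0 ((n : Int) + a) := by
  simp [PySem.List.clampIdx]
  omega

-- for window_size ≤ 0 outside D_, A also returns []
theorem a_nil_of_nonpos (words : List String) (ws : Int) (hws : ws ≤ 0)
    (hnd : ¬ D_get_training_pairs words ws) :
    get_training_pairs words ws = [] := by
  rw [get_training_pairs_eq_flatMap]
  apply List.flatMap_eq_nil_iff.mpr
  intro i hi
  have hi' := (PySem.List.mem_pyRange_one).mp hi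
  set n : Int := (words.length : Int) with hn
  unfold pvChunk
  have hleft : PySem.List.slice words (some (max 0 (i - ws))) (some i) = [] := by
    apply slice_nil_of_le
    rw [clampIdx_nonneg_eq words.length i (by omega),
        clampIdx_nonneg_eq words.length (max 0 (i - ws)) (by omega)]
    omega
  have hright : PySem.List.slice words (some (i + 1)) (some (min (n - 1) (i + ws) + 1)) = [] := by
    apply slice_nil_of_le
    set b : Int := min (n - 1) (i + ws) + 1 with hbdef
    rw [clampIdx_nonneg_eq words.length (i + 1) (by omega)]
    rcases le_or_gt 0 b with hb | hb
    · rw [clampIdx_nonneg_eq words.length b hb]; omega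
    · have := clampIdx_neg_eq words.length b hb
      unfold D_get_training_pairs at hnd
      omega
  rw [hleft, hright]
  simp

theorem get_training_pairs_spec : Claim_unchanged_get_training_pairs := by
  intro words ws _ hnd
  rcases le_or_gt ws 0 with hws | hws
  · rw [a_nil_of_nonpos words ws hws hnd, alt_nil_of_nonpos words ws hws]
  · have hw : 1 ≤ ws := by omega
    rw [get_training_pairs_eq_flatMap]
    unfold get_training_pairs_alt
    rw [if_neg (by omega)]
    have h0 : PySem.List.slice words (some 1) (some (ws + 1)) = pvR words ws.toNat 0 := by
      rw [PySem.List.slice_toNat words (a := 1) (b := ws + 1) (by omega) (by omega)]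
      unfold pvR
      congr 1
      omega
    have h1 : PySem.List.slice words (some (ws + 1)) none = pvAH words ws.toNat 0 := by
      rw [PySem.List.slice_from words (by omega)]
      unfold pvAH
      congr 1
      omega
    have h2 : ([] : List String) = pvL words ws.toNat 0 := by
      unfold pvL
      simp
    rw [h0, h1, h2]
    have := pvGoB_inv words ws hw words.length 0 [] (by omega) (by omega)
    rw [List.drop_zero] at this
    rw [this]
    simp

theorem get_training_pairs_tight : Claim_exact_get_training_pairs := by
  intro words ws _ hd
  rcases hd with ⟨hws, hlen⟩
  rw [alt_nil_of_nonpos words ws (by omega)]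
  rw [get_training_pairs_eq_flatMap]
  intro hcontra
  set n : Int := (words.length : Int) with hn
  have h0n : (0 : Int) < n := by omega
  have h0mem : (0 : Int) ∈ PySem.List.pyRange 0 n 1 :=
    (PySem.List.mem_pyRange_one).mpr ⟨le_refl 0, h0n⟩
  have := List.flatMap_eq_nil_iff.mp hcontra 0 h0mem
  -- the chunk at i = 0 is nonempty: the right slice wraps around
  have hright : PySem.List.slice words (some (0 + 1)) (some (min (n - 1) (0 + ws) + 1)) ≠ [] := by
    intro hnil
    have hl := PySem.List.length_slice words (0 + 1) (min (n - 1) (0 + ws) + 1)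
    rw [hnil] at hl
    norm_num at hl
    rw [show min (n - 1) ws + 1 = ws + 1 from by omega] at hl
    have h1 := clampIdx_nonneg_eq words.length 1 (by omega)
    have h2 := clampIdx_neg_eq words.length (ws + 1) (by omega)
    omega
  unfold pvChunk at this
  rw [List.map_eq_nil_iff, List.append_eq_nil_iff] at this
  exact hright this.2

-- ===== VERDICT (by name: the statement is the Claim_ definition above) =====
theorem get_training_pairs_changed : Claim_changed_get_training_pairs := by
  unfold Claim_changed_get_training_pairs; decide
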